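-- pv_equiv track=rewrite | github.com/AlishaSultan/DSA | triplet consecutive sum.py | triplet_consecutive_sum
-- ===== SOURCE A (Python) =====
-- def triplet_consecutive_sum (arr):
--     max_triplet = float('-inf')
--     triplet = []
--     for i in range(len(arr) - 2):
--         triplet_sum = arr[i]+arr[i+1]+arr[i+2]
--         if triplet_sum > max_triplet:
--             max_triplet = triplet_sum
--             triplet = [arr[i],arr[i+1],arr[i+2]]
--     return triplet
--
-- arr = [2,3,4,5,6,7,9,3,4]
-- ===== SOURCE B (Python) =====
-- def triplet_consecutive_sum(arr):
--     n = len(arr)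
--     if n < 3:
--         return []
--     prefix = [0]
--     total = 0
--     for x in arr:
--         total += x
--         prefix.append(total)
--     best = n - 3
--     for k in range(n - 4, -1, -1):
--         if prefix[k + 3] - prefix[k] >= prefix[best + 3] - prefix[best]:
--             best = k
--     return [arr[best], arr[best + 1], arr[best + 2]]
-- ===== Notes on version B (the rewrite author's own statement) =====
-- stated objective: alternative
-- what changed: Replaces A's left-to-right running max over freshly built triplet lists (with a -inf sentinel) by a prefix-sum array: each window is scored as a prefix difference and the best window INDEX is found by a right-to-left scan with a >= update (ties resolve to the smaller index, matching A's first-max), the triplet being materialised only once at the end.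
import Mathlib
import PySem

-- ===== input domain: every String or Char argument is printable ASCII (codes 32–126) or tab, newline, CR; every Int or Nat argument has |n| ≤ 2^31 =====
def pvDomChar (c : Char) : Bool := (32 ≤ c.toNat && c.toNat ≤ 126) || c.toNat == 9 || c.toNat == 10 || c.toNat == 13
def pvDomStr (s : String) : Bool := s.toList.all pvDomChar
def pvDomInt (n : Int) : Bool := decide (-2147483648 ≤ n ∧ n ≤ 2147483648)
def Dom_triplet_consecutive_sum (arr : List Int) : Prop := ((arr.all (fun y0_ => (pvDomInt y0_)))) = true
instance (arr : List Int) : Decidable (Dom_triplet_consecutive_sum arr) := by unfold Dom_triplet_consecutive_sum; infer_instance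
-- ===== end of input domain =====

-- B finds the best window by a different route: it builds a prefix-sum array, scores each
-- window as a prefix difference, and scans the window indices RIGHT-TO-LEFT keeping the best
-- index (ties to the smaller index via >=), instead of A's left-to-right running max over
-- freshly built triplets with a -inf sentinel. Alternative decomposition; same cost.


-- ===== PORT A =====
-- Loop body of A over the element accessor g (g i = arr[i]).
-- float('-inf') is represented by `none`: every integer triplet sum compares greater
-- than it, exactly as every int compares greater than -inf in Python.
def stepA (g : Int → Int) (st : Option Int × List Int) (i : Int) : Option Int × List Int :=
  match st.1 with
  | none =>
    (some (g i + g (i + 1) + g (i + 2)), [g i, g (i + 1), g (i + 2)])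
  | some m =>
    if m < g i + g (i + 1) + g (i + 2) then
      (some (g i + g (i + 1) + g (i + 2)), [g i, g (i + 1), g (i + 2)])
    else st

def triplet_consecutive_sum (arr : List Int) : List Int :=
  ((PySem.List.pyRange 0 ((arr.length : Int) - 2) 1).foldl
    (stepA (fun i => PySem.List.pyGetD arr i 0)) (none, [])).2

-- ===== PORT B =====
-- prefix-building loop body: prefix.append(total + x); total += x
def pfStep (st : List Int × Int) (x : Int) : List Int × Int := (st.1 ++ [st.2 + x], st.2 + x)

def triplet_consecutive_sum_alt (arr : List Int) : List Int :=
  if (arr.length : Int) < 3 then []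
  else
    let pf := (arr.foldl pfStep ([0], 0)).1
    let best := (PySem.List.pyRange ((arr.length : Int) - 4) (-1) (-1)).foldl
      (fun b k =>
        if PySem.List.pyGetD pf (k + 3) 0 - PySem.List.pyGetD pf k 0 ≥
           PySem.List.pyGetD pf (b + 3) 0 - PySem.List.pyGetD pf b 0 then k else b)
      ((arr.length : Int) - 3)
    [PySem.List.pyGetD arr best 0, PySem.List.pyGetD arr (best + 1) 0,
     PySem.List.pyGetD arr (best + 2) 0]

-- ===== PRECONDITION & SPEC =====
def Spec_triplet_consecutive_sum (arr : List Int) (out : List Int) : Prop := out = triplet_consecutive_sum_alt arr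
instance (arr : List Int) (out : List Int) : Decidable (Spec_triplet_consecutive_sum arr out) := by unfold Spec_triplet_consecutive_sum; infer_instance

-- ===== CLAIM (what is proved, stated in full; the proofs are below) =====
def Claim_equal_triplet_consecutive_sum : Prop := ∀ (arr : List Int), Dom_triplet_consecutive_sum arr → Spec_triplet_consecutive_sum arr (triplet_consecutive_sum arr)

-- ===== LEMMAS AND PROOFS =====

-- window score and window triplet, over the accessor g
def fOf (g : Int → Int) (k : Int) : Int := g k + g (k + 1) + g (k + 2)
def tripleOf (g : Int → Int) (k : Int) : List Int := [g k, g (k + 1), g (k + 2)]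

-- first-argmax step (A's comparison projected to the window index)
def sstep (f : Int → Int) (acc : Option Int) (k : Int) : Option Int :=
  match acc with
  | none => some k
  | some b => if f b < f k then some k else some b

-- B's right-to-left step, abstractly
def updGE (f : Int → Int) (b k : Int) : Int := if f b ≤ f k then k else b

-- generic foldl congruence under an accumulator invariant
theorem foldl_congr_inv {α β : Type} (P : β → Prop) (l : List α) (F1 F2 : β → α → β)
    (b : β) (hb : P b)
    (h : ∀ acc x, P acc → x ∈ l → F1 acc x = F2 acc x ∧ P (F2 acc x)) :
    l.foldl F1 b = l.foldl F2 b := by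
  induction l generalizing b with
  | nil => rfl
  | cons x xs ih =>
    have hx := h b x hb (List.mem_cons_self)
    simp only [List.foldl_cons, hx.1]
    exact ih (F2 b x) hx.2 (fun acc y hacc hy => h acc y hacc (List.mem_cons_of_mem _ hy))

-- the prefix fold builds the list of partial sums
theorem pf_spec (arr : List Int) : ∀ (p : List Int) (t : Int),
    arr.foldl pfStep (p, t)
      = (p ++ (List.range arr.length).map (fun i => t + (arr.take (i + 1)).sum),
         t + arr.sum) := by
  induction arr with
  | nil => intro p t; simp
  | cons x xs ih =>
    intro p t
    simp only [List.foldl_cons, pfStep, ih]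
    rw [List.length_cons, List.range_succ_eq_map, Prod.mk.injEq]
    refine ⟨?_, by simp; ring⟩
    simp only [List.map_cons, List.map_map, List.append_assoc, List.singleton_append]
    congr 1
    congr 1
    · simp
    · congr 1
      funext i
      simp [Function.comp]
      ring

theorem pf_get_nat (arr : List Int) (j : Nat) (h : j < arr.length + 1) :
    ([0] ++ (List.range arr.length).map (fun i => 0 + (arr.take (i + 1)).sum))[j]'(by
      simp; omega) = (arr.take j).sum := by
  cases j with
  | zero => simp
  | succ m =>
    have hm : m < arr.length := by omega
    simp [hm]

theorem pf_get (arr : List Int) (i : Int) (h0 : 0 ≤ i) (hle : i ≤ (arr.length : Int)) :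
    PySem.List.pyGetD ((arr.foldl pfStep ([0], 0)).1) i 0 = (arr.take i.toNat).sum := by
  rw [pf_spec arr [0] 0]
  have hlen : (([0] ++ (List.range arr.length).map (fun i => 0 + (arr.take (i + 1)).sum)).length)
      = arr.length + 1 := by simp
  dsimp only
  rw [PySem.List.pyGetD_eq_getElem _ 0 h0 (by rw [hlen]; push_cast; omega)]
  exact pf_get_nat arr i.toNat (by omega)

theorem window_sum (arr : List Int) (k : Int) (h0 : 0 ≤ k) (h3 : k + 3 ≤ (arr.length : Int)) :
    (arr.take (k + 3).toNat).sum - (arr.take k.toNat).sum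
      = fOf (fun i => PySem.List.pyGetD arr i 0) k := by
  have e3 : (k + 3).toNat = k.toNat + 3 := by omega
  rw [e3, List.sum_take_succ arr (k.toNat + 2) (by omega), List.sum_take_succ arr (k.toNat + 1) (by omega),
    List.sum_take_succ arr k.toNat (by omega)]
  simp only [fOf]
  rw [PySem.List.pyGetD_eq_getElem arr 0 h0 (by omega),
    PySem.List.pyGetD_eq_getElem arr 0 (show (0:Int) ≤ k + 1 by omega) (by omega),
    PySem.List.pyGetD_eq_getElem arr 0 (show (0:Int) ≤ k + 2 by omega) (by omega)]
  simp only [show (k + 1).toNat = k.toNat + 1 from by omega,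
    show (k + 2).toNat = k.toNat + 2 from by omega]
  ring

-- collapsing the last two candidates of a strict first-max fold into their >=-winner
theorem sfold_collapse (f : Int → Int) (xs : List Int) (k b : Int) :
    List.foldl (sstep f) none (xs ++ [k, b])
      = List.foldl (sstep f) none (xs ++ [updGE f b k]) := by
  rw [List.foldl_append, List.foldl_append]
  rcases List.foldl (sstep f) none xs with _ | s <;>
    simp only [List.foldl_cons, List.foldl_nil, sstep, updGE] <;>
    split_ifs <;> simp_all <;> omega

-- B's descending >=-scan equals the strict first-max fold over the ascending list
theorem rev_scan_eq_sfold (f : Int → Int) (d : List Int) : ∀ (b : Int),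
    List.foldl (sstep f) none (d.reverse ++ [b]) = some (d.foldl (updGE f) b) := by
  induction d with
  | nil => intro b; rfl
  | cons k rest ih =>
    intro b
    have : (k :: rest).reverse ++ [b] = rest.reverse ++ [k, b] := by simp
    rw [this, sfold_collapse, ih (updGE f b k)]
    rfl

-- A's fold, related to the strict first-max fold over window indices
theorem A_rel (g : Int → Int) (l : List Int) : ∀ (st : Option Int × List Int)
    (acc : Option Int) (t : List Int),
    ((st = (none, t) ∧ acc = none) ∨
      (∃ k, st = (some (fOf g k), tripleOf g k) ∧ acc = some k)) →
    (l.foldl (stepA g) st).2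
      = (Option.map (tripleOf g) (l.foldl (sstep (fOf g)) acc)).getD t := by
  induction l with
  | nil =>
    intro st acc t h
    rcases h with ⟨h1, h2⟩ | ⟨k, h1, h2⟩ <;> subst h1 <;> subst h2 <;> simp
  | cons i rest ih =>
    intro st acc t h
    simp only [List.foldl_cons]
    rcases h with ⟨h1, h2⟩ | ⟨k, h1, h2⟩ <;> subst h1 <;> subst h2
    · exact ih _ _ t (Or.inr ⟨i, rfl, rfl⟩)
    · simp only [stepA, sstep, fOf]
      split_ifs with hc
      · exact ih _ _ t (Or.inr ⟨i, rfl, rfl⟩)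
      · exact ih _ _ t (Or.inr ⟨k, rfl, rfl⟩)

-- ===== VERDICT (by name: the statement is the Claim_ definition above) =====
theorem triplet_consecutive_sum_spec : Claim_equal_triplet_consecutive_sum := by
  intro arr _
  unfold Spec_triplet_consecutive_sum triplet_consecutive_sum triplet_consecutive_sum_alt
  by_cases hn : (arr.length : Int) < 3
  · rw [if_pos hn, PySem.List.pyRange_one_eq_nil (by omega)]
    rfl
  · rw [if_neg hn]
    dsimp only
    set g : Int → Int := fun i => PySem.List.pyGetD arr i 0 with hg
    set n : Int := (arr.length : Int) with hnn
    set pf : List Int := (arr.foldl pfStep ([0], 0)).1 with hpf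
    have hscore : ∀ j : Int, 0 ≤ j → j + 3 ≤ n →
        PySem.List.pyGetD pf (j + 3) 0 - PySem.List.pyGetD pf j 0 = fOf g j := by
      intro j h0 h3
      rw [hpf, pf_get arr (j + 3) (by omega) (by omega), pf_get arr j h0 (by omega)]
      exact window_sum arr j h0 h3
    have hfold :
        (PySem.List.pyRange (n - 4) (-1) (-1)).foldl
          (fun b k =>
            if PySem.List.pyGetD pf (k + 3) 0 - PySem.List.pyGetD pf k 0 ≥
               PySem.List.pyGetD pf (b + 3) 0 - PySem.List.pyGetD pf b 0 then k else b)
          (n - 3)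
        = (PySem.List.pyRange (n - 4) (-1) (-1)).foldl (updGE (fOf g)) (n - 3) := by
      apply foldl_congr_inv (fun b => 0 ≤ b ∧ b ≤ n - 3) _ _ _ _ ⟨by omega, by omega⟩
      intro acc k hacc hk
      have hk' := (PySem.List.mem_pyRange_neg_one).mp hk
      constructor
      · rw [hscore k (by omega) (by omega), hscore acc hacc.1 (by omega)]
        rfl
      · unfold updGE
        split_ifs <;> omega
    rw [hfold]
    have hrev : PySem.List.pyRange (n - 4) (-1) (-1) = (PySem.List.pyRange 0 (n - 3) 1).reverse := by
      rw [PySem.List.pyRange_neg_one_eq_reverse,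
        show (-1 : Int) + 1 = 0 from rfl, show n - 4 + 1 = n - 3 from by ring]
    rw [hrev]
    have hbest :
        (PySem.List.pyRange 0 (n - 2) 1).foldl (sstep (fOf g)) none
          = some (((PySem.List.pyRange 0 (n - 3) 1).reverse).foldl (updGE (fOf g)) (n - 3)) := by
      rw [show n - 2 = (n - 3) + 1 from by ring, PySem.List.pyRange_one_succ_right (by omega)]
      have h := rev_scan_eq_sfold (fOf g) ((PySem.List.pyRange 0 (n - 3) 1).reverse) (n - 3)
      rw [List.reverse_reverse] at h
      exact h
    rw [A_rel g (PySem.List.pyRange 0 (n - 2) 1) (none, []) none [] (Or.inl ⟨rfl, rfl⟩), hbest]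
    rfl
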